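-- pv_equiv track=rewrite | github.com/RexfordProgrammer/CarSuggestionTool | backend/aws-sam/lambdas/on_send_message_v3/llm_response_processors.py | _strip_full_repeats
-- ===== SOURCE A (Python) =====
-- def _strip_full_repeats(text: str) -> str:
--     """
--     Detects cases like 'X X', 'X X X', etc. (exact repetition of the
--     same block 2–5 times) and returns just 'X'.
--     """
--     candidate = text.strip()
--     if not candidate:
--         return text
--
--     # Try N copies where N is small (we only care about obvious glitches)
--     for n in range(2, 6):
--         if len(candidate) % n != 0:
--             continue
--         unit_len = len(candidate) // n
--         unit = candidate[:unit_len]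
--         if unit * n == candidate:
--             return unit.strip()
--
--     return text
-- ===== SOURCE B (Python) =====
-- def _strip_full_repeats(text: str) -> str:
--     """Collapse a block repeated 2-5 times via the doubled-string smallest-period trick."""
--     candidate = text.strip()
--     if not candidate:
--         return text
--     # smallest rotation period p: first occurrence of candidate inside candidate+candidate after 0
--     p = (candidate + candidate).find(candidate, 1)
--     k = len(candidate) // p
--     for d in (2, 3, 4, 5):
--         if k % d == 0:
--             return candidate[:len(candidate) // d].strip()
--     return text
-- ===== Notes on version B (the rewrite author's own statement) =====
-- stated objective: alternative
-- what changed: Instead of trying each repeat count n = 2..5 and comparing unit*n against the stripped text, B computes the smallest rotation period once via the doubled-string trick p = (c+c).find(c, 1), derives the maximal repeat count k = len(c)//p, and returns the unit for the smallest divisor of k in 2..5.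
import Mathlib
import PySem

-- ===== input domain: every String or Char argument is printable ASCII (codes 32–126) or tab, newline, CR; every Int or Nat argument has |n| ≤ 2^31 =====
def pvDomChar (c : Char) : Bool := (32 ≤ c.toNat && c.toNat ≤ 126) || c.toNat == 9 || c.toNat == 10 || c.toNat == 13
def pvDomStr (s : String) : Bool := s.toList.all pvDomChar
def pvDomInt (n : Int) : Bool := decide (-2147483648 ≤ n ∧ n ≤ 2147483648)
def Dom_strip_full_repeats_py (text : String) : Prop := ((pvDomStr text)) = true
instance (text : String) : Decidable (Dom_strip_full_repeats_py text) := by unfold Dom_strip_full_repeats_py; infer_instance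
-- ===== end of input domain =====

-- B replaces A's four divisor trials (try n = 2..5 copies directly) with one smallest-rotation-period
-- computation via the doubled-string find trick (alternative algorithm, same asymptotic cost).

-- ===== PORT A =====
-- the 'for n in range(2, 6)' loop of A; 'continue' is recursion on the rest of the range
def pvLoopA (candidate : List Char) (text : String) : List Int → String
  | [] => text
  | n :: rest =>
      if PySem.Int.mod (PySem.Chars.len candidate) n ≠ 0 then pvLoopA candidate text rest
      else
        if PySem.List.pyRepeat (PySem.Chars.slice candidate none
            (some (PySem.Int.floordiv (PySem.Chars.len candidate) n))) n = candidate then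
          String.ofList (PySem.Chars.strip (PySem.Chars.slice candidate none
            (some (PySem.Int.floordiv (PySem.Chars.len candidate) n))))
        else pvLoopA candidate text rest

def strip_full_repeats_py (text : String) : String :=
  if PySem.Chars.strip text.toList = [] then text
  else pvLoopA (PySem.Chars.strip text.toList) text (PySem.List.pyRange 2 6 1)

-- ===== PORT B =====
-- the 'for d in (2, 3, 4, 5)' loop of B
def pvLoopB (candidate : List Char) (k : Int) (text : String) : List Int → String
  | [] => text
  | d :: rest =>
      if PySem.Int.mod k d = 0 then
        String.ofList (PySem.Chars.strip (PySem.Chars.slice candidate none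
          (some (PySem.Int.floordiv (PySem.Chars.len candidate) d))))
      else pvLoopB candidate k text rest

-- p = (candidate+candidate).find(candidate, 1) is the smallest rotation period; k = len(candidate)//p
def strip_full_repeats_py_alt (text : String) : String :=
  if PySem.Chars.strip text.toList = [] then text
  else
    pvLoopB (PySem.Chars.strip text.toList)
      (PySem.Int.floordiv (PySem.Chars.len (PySem.Chars.strip text.toList))
        (PySem.Chars.findFrom (PySem.Chars.strip text.toList ++ PySem.Chars.strip text.toList)
          (PySem.Chars.strip text.toList) 1 none))
      text [2, 3, 4, 5]

-- ===== PRECONDITION & SPEC =====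
def Spec_strip_full_repeats_py (text : String) (out : String) : Prop := out = strip_full_repeats_py_alt text
instance (text : String) (out : String) : Decidable (Spec_strip_full_repeats_py text out) := by unfold Spec_strip_full_repeats_py; infer_instance

-- ===== CLAIM (what is proved, stated in full; the proofs are below) =====
def Claim_equal_strip_full_repeats_py : Prop := ∀ (text : String), Dom_strip_full_repeats_py text → Spec_strip_full_repeats_py text (strip_full_repeats_py text)

-- ===== LEMMAS AND PROOFS =====

-- a fixed rotation stays fixed under multiples
theorem pvFixMul (c : List Char) (P q : Nat) (h : c.rotate P = c) : c.rotate (q * P) = c := by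
  induction q with
  | zero => simp
  | succ q ih =>
    have := List.rotate_rotate c (q * P) P
    rw [ih, h] at this
    rw [Nat.succ_mul]
    exact this.symm

-- shifting a concatenation of identical blocks by one block
theorem pvFlattenReplicateComm {α : Type} (u : List α) (k : Nat) :
    (List.replicate k u).flatten ++ u = u ++ (List.replicate k u).flatten := by
  induction k with
  | zero => simp
  | succ k ih => simp only [List.replicate_succ, List.flatten_cons, List.append_assoc, ih]

-- a word equal to n ≥ 1 copies of u is fixed by the rotation |u|
theorem pvRepeatRotate {α : Type} (u : List α) (n : Nat) (hn : 1 ≤ n) (c : List α)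
    (h : (List.replicate n u).flatten = c) :
    c.drop u.length ++ c.take u.length = c := by
  obtain ⟨m, rfl⟩ : ∃ m, n = m + 1 := ⟨n - 1, by omega⟩
  subst h
  rw [List.replicate_succ, List.flatten_cons, List.drop_left, List.take_left]
  exact pvFlattenReplicateComm u m

-- a word fixed by the rotation m with m * K = |c| is K copies of its length-m prefix
theorem pvPowOfFix (K : Nat) (c : List Char) (m : Nat) (hlen : c.length = m * K)
    (hfix : c.drop m ++ c.take m = c) :
    c = (List.replicate K (c.take m)).flatten := by
  induction K generalizing c with
  | zero =>
    have : c = [] := List.eq_nil_of_length_eq_zero (by omega)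
    simp [this]
  | succ K ih =>
    cases K with
    | zero =>
      have hm : m = c.length := by omega
      simp [hm, List.take_length]
    | succ K' =>
      have hm_le : m ≤ c.length := by nlinarith [hlen]
      have hmul : m * (K' + 1 + 1) = m * (K' + 1) + m := by ring
      have hdlen : (c.drop m).length = m * (K' + 1) := by
        rw [List.length_drop]; omega
      have hmd : m ≤ (c.drop m).length := by
        rw [hdlen]; nlinarith
      have hdt : (c.drop m).take m = c.take m := by
        conv_rhs => rw [← hfix]
        rw [List.take_append_of_le_length hmd]
      have hdd : (c.drop m).drop m ++ (c.drop m).take m = c.drop m := by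
        conv_rhs => rw [← hfix]
        rw [List.drop_append_of_le_length hmd, hdt]
      have hrec := ih (c.drop m) hdlen hdd
      rw [hdt] at hrec
      conv_lhs => rw [← List.take_append_drop m c, hrec]
      simp [List.replicate_succ]

-- every fixed rotation amount is a multiple of the smallest positive one
theorem pvFixDvd (c : List Char) (P : Nat) (hP1 : 1 ≤ P) (hfixP : c.rotate P = c)
    (hmin : ∀ i, 1 ≤ i → i < P → ¬ c.rotate i = c) :
    ∀ n, c.rotate n = c → P ∣ n := by
  intro n h
  have hq : c.rotate ((n / P) * P) = c := pvFixMul c P (n / P) hfixP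
  have hr : c.rotate (n % P) = c := by
    have hrr := List.rotate_rotate c ((n / P) * P) (n % P)
    rw [hq] at hrr
    rw [hrr, show n / P * P + n % P = n from by rw [Nat.mul_comm (n / P) P]; exact Nat.div_add_mod n P]
    exact h
  by_cases h0 : n % P = 0
  · exact Nat.dvd_of_mod_eq_zero h0
  · exact absurd hr (hmin (n % P) (by omega) (Nat.mod_lt n (by omega)))

-- c occurs in c++c at position i ≤ |c| exactly when rotating c by i leaves it unchanged
theorem pvPrefixDropIff (c : List Char) (i : Nat) (hi : i ≤ c.length) :
    c <+: (c ++ c).drop i ↔ c.rotate i = c := by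
  rw [List.drop_append_of_le_length hi, List.prefix_iff_eq_take,
    List.rotate_eq_drop_append_take hi, List.take_append]
  rw [List.length_drop]
  rw [show c.length - (c.length - i) = i by omega]
  constructor
  · intro h
    conv_rhs => rw [h]
    have : (c.drop i).take c.length = c.drop i := List.take_of_length_le (by simp)
    rw [this]
  · intro h
    conv_lhs => rw [← h]
    congr 1
    exact (List.take_of_length_le (by simp)).symm

-- the heart: A's per-n test (n divides |c| and c is n copies of its |c|/n-prefix)
-- is equivalent to B's per-n test (n divides |c|/P, P the smallest rotation period)
theorem pvKeyIff (c : List Char) (hne : c ≠ []) (P : Nat) (hP1 : 1 ≤ P)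
    (hfixP : c.rotate P = c)
    (hmin : ∀ i, 1 ≤ i → i < P → ¬ c.rotate i = c)
    (hPL : P ∣ c.length) (N : Nat) (hN : 1 ≤ N) :
    (N ∣ c.length ∧ (List.replicate N (c.take (c.length / N))).flatten = c)
      ↔ N ∣ c.length / P := by
  have hL1 : 1 ≤ c.length := List.length_pos_of_ne_nil hne
  constructor
  · rintro ⟨hdvd, hrep⟩
    have hm_le : c.length / N ≤ c.length := Nat.div_le_self _ _
    have hmlen : (c.take (c.length / N)).length = c.length / N := by
      rw [List.length_take]; omega
    have hfixm' := pvRepeatRotate (c.take (c.length / N)) N hN c hrep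
    rw [hmlen] at hfixm'
    have hfixm : c.rotate (c.length / N) = c := by
      rw [List.rotate_eq_drop_append_take hm_le]; exact hfixm'
    obtain ⟨j, hj⟩ := pvFixDvd c P hP1 hfixP hmin _ hfixm
    have hLm : c.length = c.length / N * N := (Nat.div_mul_cancel hdvd).symm
    refine ⟨j, ?_⟩
    have hL' : c.length = P * (N * j) := by rw [hLm, hj]; ring
    rw [hL', Nat.mul_div_cancel_left _ (show 0 < P by omega)]
  · rintro ⟨j, hj⟩
    have hLP : c.length = c.length / P * P := (Nat.div_mul_cancel hPL).symm
    have hL : c.length = P * (N * j) := by rw [hLP, hj]; ring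
    have hj1 : 1 ≤ j := by
      rcases Nat.eq_zero_or_pos j with h0 | h1
      · subst h0
        have h0' : c.length = 0 := by rw [hL]; ring
        omega
      · exact h1
    have hm : c.length / N = P * j := by
      rw [hL, show P * (N * j) = N * (P * j) by ring]
      exact Nat.mul_div_cancel_left _ (by omega)
    have hm_le : c.length / N ≤ c.length := Nat.div_le_self _ _
    have hfixm : c.rotate (c.length / N) = c := by
      rw [hm, show P * j = j * P by ring]
      exact pvFixMul c P j hfixP
    refine ⟨⟨P * j, by rw [hL]; ring⟩, ?_⟩
    have := pvPowOfFix N c (c.length / N) (by rw [hm, hL]; ring)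
      (by rw [← List.rotate_eq_drop_append_take hm_le]; exact hfixm)
    exact this.symm

theorem pvModCast (a b : Nat) : PySem.Int.mod (a : Int) (b : Int) = ((a % b : Nat) : Int) := by
  show Int.fmod _ _ = _
  rw [Int.fmod_eq_emod]
  simp

theorem pvFdivCast (a b : Nat) : PySem.Int.floordiv (a : Int) (b : Int) = ((a / b : Nat) : Int) := by
  show Int.fdiv _ _ = _
  rw [Int.fdiv_eq_ediv]
  simp

-- the two loops agree step by step once the per-n tests are known equivalent
theorem pvLoopEq (c : List Char) (text : String) (K : Nat)
    (hiff : ∀ N : Nat, 1 ≤ N →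
      ((N ∣ c.length ∧ (List.replicate N (c.take (c.length / N))).flatten = c) ↔ N ∣ K))
    (l : List Int) (hl : ∀ n ∈ l, ∃ N : Nat, 1 ≤ N ∧ n = (N : Int)) :
    pvLoopA c text l = pvLoopB c (K : Int) text l := by
  induction l with
  | nil => rfl
  | cons n rest ih =>
    obtain ⟨N, hN1, rfl⟩ := hl n List.mem_cons_self
    have ihr := ih (fun x hx => hl x (List.mem_cons_of_mem _ hx))
    have hmodL : PySem.Int.mod (PySem.Chars.len c) (N : Int) = ((c.length % N : Nat) : Int) := by
      rw [PySem.Chars.len_eq]; exact pvModCast _ _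
    have hmodK : PySem.Int.mod (K : Int) (N : Int) = ((K % N : Nat) : Int) := pvModCast _ _
    have hfd : PySem.Int.floordiv (PySem.Chars.len c) (N : Int) = ((c.length / N : Nat) : Int) := by
      rw [PySem.Chars.len_eq]; exact pvFdivCast _ _
    have hslice : PySem.Chars.slice c none (some ((c.length / N : Nat) : Int))
        = c.take (c.length / N) := by
      rw [PySem.Chars.slice_eq_listSlice, PySem.List.slice_to c (by positivity),
        Int.toNat_natCast]
    have hrepeq : PySem.List.pyRepeat (c.take (c.length / N)) (N : Int)
        = (List.replicate N (c.take (c.length / N))).flatten := by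
      simp [PySem.List.pyRepeat]
    simp only [pvLoopA, pvLoopB, hmodL, hfd, hslice, hrepeq, hmodK, ne_eq, Nat.cast_eq_zero]
    have hmod_iff : ∀ m : Nat, N ∣ m ↔ m % N = 0 :=
      fun m => ⟨Nat.mod_eq_zero_of_dvd, Nat.dvd_of_mod_eq_zero⟩
    by_cases hd : N ∣ K
    · obtain ⟨hdL, hrep⟩ := (hiff N hN1).mpr hd
      have hLmod : c.length % N = 0 := (hmod_iff _).mp hdL
      have hKmod : K % N = 0 := (hmod_iff _).mp hd
      rw [if_neg (by simp [hLmod]), if_pos hrep, if_pos hKmod]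
    · have hKmod : ¬ K % N = 0 := fun h => hd (Nat.dvd_of_mod_eq_zero h)
      rw [if_neg hKmod]
      by_cases hL : c.length % N = 0
      · have hrep : ¬ (List.replicate N (c.take (c.length / N))).flatten = c := fun hr =>
          hd ((hiff N hN1).mp ⟨Nat.dvd_of_mod_eq_zero hL, hr⟩)
        rw [if_neg (by simp [hL]), if_neg hrep]
        exact ihr
      · rw [if_pos (by simpa using hL)]
        exact ihr

theorem pvMain (text : String) : strip_full_repeats_py text = strip_full_repeats_py_alt text := by
  unfold strip_full_repeats_py strip_full_repeats_py_alt
  by_cases hce : PySem.Chars.strip text.toList = []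
  · rw [if_pos hce, if_pos hce]
  · rw [if_neg hce, if_neg hce]
    set c := PySem.Chars.strip text.toList with hc
    have hL1 : 1 ≤ c.length := List.length_pos_of_ne_nil hce
    have h1len : (1 : Nat) ≤ (c ++ c).length := by
      rw [List.length_append]; omega
    -- p := findFrom (c++c) c 1 is a genuine occurrence position
    have hpne : PySem.Chars.findFrom (c ++ c) c 1 none ≠ -1 := by
      have hiffn := PySem.Chars.findFrom_natCast_eq_neg_one_iff (c ++ c) c 1 h1len
      rw [Nat.cast_one] at hiffn
      intro h
      exact (hiffn.mp h) (by
        rw [List.drop_append_of_le_length hL1]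
        exact (List.suffix_append _ c).isInfix)
    have hspec := PySem.Chars.findFrom_natCast_spec (c ++ c) c 1 h1len
      (by rw [Nat.cast_one]; exact hpne)
    rw [Nat.cast_one] at hspec
    obtain ⟨hp1, hpref, hminp⟩ := hspec
    set P := (PySem.Chars.findFrom (c ++ c) c 1 none).toNat with hPdef
    have hpP : PySem.Chars.findFrom (c ++ c) c 1 none = (P : Int) :=
      (Int.toNat_of_nonneg (by omega)).symm
    have hP1 : 1 ≤ P := by omega
    have hPle : P ≤ c.length := by
      by_contra hgt
      exact (hminp c.length (by omega) (by omega)) (by rw [List.drop_left])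
    have hfixP : c.rotate P = c := (pvPrefixDropIff c P hPle).mp hpref
    have hmin : ∀ i, 1 ≤ i → i < P → ¬ c.rotate i = c := fun i hi1 hiP hfix =>
      (hminp i hi1 hiP) ((pvPrefixDropIff c i (by omega)).mpr hfix)
    have hPL : P ∣ c.length := pvFixDvd c P hP1 hfixP hmin c.length (List.rotate_length c)
    have hkval : PySem.Int.floordiv (PySem.Chars.len c)
        (PySem.Chars.findFrom (c ++ c) c 1 none) = ((c.length / P : Nat) : Int) := by
      rw [PySem.Chars.len_eq, hpP]; exact pvFdivCast _ _
    rw [hkval, show PySem.List.pyRange 2 6 1 = [2, 3, 4, 5] from by decide]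
    exact pvLoopEq c text (c.length / P)
      (fun N hN => pvKeyIff c hce P hP1 hfixP hmin hPL N hN)
      [2, 3, 4, 5]
      (by
        intro n hn
        simp only [List.mem_cons, List.not_mem_nil, or_false] at hn
        rcases hn with rfl | rfl | rfl | rfl
        · exact ⟨2, by omega, by norm_num⟩
        · exact ⟨3, by omega, by norm_num⟩
        · exact ⟨4, by omega, by norm_num⟩
        · exact ⟨5, by omega, by norm_num⟩)

-- ===== VERDICT (by name: the statement is the Claim_ definition above) =====
theorem strip_full_repeats_py_spec : Claim_equal_strip_full_repeats_py := by
  intro text _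
  exact pvMain text
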